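-- pv_equiv track=rewrite | github.com/richedperson1/DSA | dynamic programming/Dice throw.py | diceThrowTab
-- ===== SOURCE A (Python) =====
-- def diceThrowTab(n, m, x):
--     dp = [[0]*(x+1) for i in range(n+1)]
--     dp[0][0] = 1
--
--     for nn in range(1, n+1):
--         for tar in range(1, x+1):
--             final = 0
--             for face in range(1, m+1):
--                 if tar-face >= 0:
--                     final += dp[nn-1][tar-face]
--
--             dp[nn][tar] = final
--
--     return dp[n][-1]
-- ===== SOURCE B (Python) =====
-- def diceThrowTab(n, m, x):
--     row = [0] * (x + 1)
--     row[0] = 1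
--     w = max(m, 0)
--     for _ in range(n):
--         pref = [0]
--         s = 0
--         for v in row:
--             s += v
--             pref.append(s)
--         new = [0] * (x + 1)
--         for t in range(1, x + 1):
--             lo = max(0, t - w)
--             new[t] = pref[t] - pref[lo]
--         row = new
--     return row[x]
-- ===== Notes on version B (the rewrite author's own statement) =====
-- stated objective: faster
-- what changed: replaces the inner loop over all m faces by a prefix-sum array of the previous DP row, so each cell is one window difference instead of an m-term sum, and keeps only one row instead of the full (n+1)x(x+1) table
import Mathlib
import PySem

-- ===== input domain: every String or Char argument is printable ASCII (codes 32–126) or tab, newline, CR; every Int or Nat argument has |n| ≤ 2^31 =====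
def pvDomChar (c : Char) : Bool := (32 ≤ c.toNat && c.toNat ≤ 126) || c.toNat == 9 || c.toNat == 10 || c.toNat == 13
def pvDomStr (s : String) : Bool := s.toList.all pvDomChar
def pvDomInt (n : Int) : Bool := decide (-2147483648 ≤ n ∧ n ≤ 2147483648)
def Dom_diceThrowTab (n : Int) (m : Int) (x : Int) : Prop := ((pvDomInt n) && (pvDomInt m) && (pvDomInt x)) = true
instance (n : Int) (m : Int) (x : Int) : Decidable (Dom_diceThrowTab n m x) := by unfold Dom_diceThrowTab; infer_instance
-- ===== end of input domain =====

-- B replaces A's inner loop over all m faces by a prefix-sum of the previous DP row (one window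
-- difference per cell) and keeps a single row instead of the whole table (objective: faster).

-- ===== PORT A =====
-- dp[i] (row read; out-of-range default [] is never hit inside Pre_)
def pvGetRow (dp : List (List Int)) (i : Int) : List Int := (PySem.List.pyGet? dp i).getD []
-- dp[i][j] (default 0 never hit inside Pre_)
def pvGet2 (dp : List (List Int)) (i : Int) (j : Int) : Int := (PySem.List.pyGet? (pvGetRow dp i) j).getD 0
-- row[j] = v (indices used are always ≥ 0 and in range inside Pre_)
def pvSetRow (row : List Int) (j : Int) (v : Int) : List Int := row.set j.toNat v
-- dp[i][j] = v
def pvSet2 (dp : List (List Int)) (i : Int) (j : Int) (v : Int) : List (List Int) :=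
  dp.set i.toNat (pvSetRow (pvGetRow dp i) j v)

def diceThrowTab (n : Int) (m : Int) (x : Int) : Int :=
  -- dp = [[0]*(x+1) for i in range(n+1)]
  let dp : List (List Int) :=
    (PySem.List.pyRange 0 (n+1) 1).map (fun _ => List.replicate (x+1).toNat 0)
  -- dp[0][0] = 1
  let dp := pvSet2 dp 0 0 1
  let dp := (PySem.List.pyRange 1 (n+1) 1).foldl (fun dp nn =>
    (PySem.List.pyRange 1 (x+1) 1).foldl (fun dp tar =>
      let final := (PySem.List.pyRange 1 (m+1) 1).foldl (fun final face =>
        if tar - face ≥ 0 then final + pvGet2 dp (nn-1) (tar-face) else final) 0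
      pvSet2 dp nn tar final) dp) dp
  -- return dp[n][-1]
  (PySem.List.pyGet? (pvGetRow dp n) (-1)).getD 0

-- ===== PORT B =====
def diceThrowTab_alt (n : Int) (m : Int) (x : Int) : Int :=
  -- row = [0]*(x+1); row[0] = 1
  let row : List Int := (List.replicate (x+1).toNat 0).set 0 1
  let w := max m 0
  let row := (PySem.List.pyRange 0 n 1).foldl (fun row _ =>
    -- pref = [0]; s = 0; for v in row: s += v; pref.append(s)
    let ps := row.foldl (fun (ps : List Int × Int) v => (ps.1 ++ [ps.2 + v], ps.2 + v)) ([0], 0)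
    let pref := ps.1
    -- new = [0]*(x+1); for t in range(1, x+1): new[t] = pref[t] - pref[max(0, t-w)]
    (PySem.List.pyRange 1 (x+1) 1).foldl (fun newRow t =>
      let lo := max 0 (t - w)
      newRow.set t.toNat (pref.getD t.toNat 0 - pref.getD lo.toNat 0))
      (List.replicate (x+1).toNat 0)) row
  -- return row[x]
  (PySem.List.pyGet? row x).getD 0

-- ===== PRECONDITION & SPEC =====
-- A raises IndexError exactly when n < 0 (dp has no row 0) or x < 0 (row 0 is empty).
def Pre_diceThrowTab (n : Int) (m : Int) (x : Int) : Prop := 0 ≤ n ∧ 0 ≤ x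
instance (n : Int) (m : Int) (x : Int) : Decidable (Pre_diceThrowTab n m x) := by
  unfold Pre_diceThrowTab; infer_instance
def pvWitness_diceThrowTab : Int × Int × Int := (3, 4, 5)

def Spec_diceThrowTab (n : Int) (m : Int) (x : Int) (out : Int) : Prop := out = diceThrowTab_alt n m x
instance (n : Int) (m : Int) (x : Int) (out : Int) : Decidable (Spec_diceThrowTab n m x out) := by unfold Spec_diceThrowTab; infer_instance

-- ===== CLAIM (what is proved, stated in full; the proofs are below) =====
def Claim_equal_diceThrowTab : Prop := ∀ (n : Int) (m : Int) (x : Int), Dom_diceThrowTab n m x → Pre_diceThrowTab n m x → Spec_diceThrowTab n m x (diceThrowTab n m x)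

-- ===== LEMMAS AND PROOFS =====

-- proof-side defs
def pvZ (x : Int) : List Int := List.replicate (x+1).toNat 0

def pvSumF (m : Int) (prev : List Int) (tar : Int) : Int :=
  (PySem.List.pyRange 1 (m+1) 1).foldl (fun final face =>
    if tar - face ≥ 0 then final + (PySem.List.pyGet? prev (tar-face)).getD 0 else final) 0

def pvRowA (m x : Int) (prev start : List Int) : List Int :=
  (PySem.List.pyRange 1 (x+1) 1).foldl (fun row tar => pvSetRow row tar (pvSumF m prev tar)) start

def pvRowB (m x : Int) (prev : List Int) : List Int :=
  let ps := prev.foldl (fun (ps : List Int × Int) v => (ps.1 ++ [ps.2 + v], ps.2 + v)) ([0], 0)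
  let pref := ps.1
  (PySem.List.pyRange 1 (x+1) 1).foldl (fun newRow t =>
    let lo := max 0 (t - max m 0)
    newRow.set t.toNat (pref.getD t.toNat 0 - pref.getD lo.toNat 0)) (List.replicate (x+1).toNat 0)

def pvIter (m x : Int) : Nat → List Int
  | 0 => (pvZ x).set 0 1
  | k+1 => pvRowA m x (pvIter m x k) (pvZ x)

-- take-sum step
theorem pv_take_sum_succ (l : List Int) (j : Nat) :
    (l.take (j+1)).sum = (l.take j).sum + l.getD j 0 := by
  rw [List.take_add_one, List.sum_append, List.getD]
  cases h : l[j]? <;> simp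

-- prefix list characterization
theorem pv_pref_fold (row : List Int) : ∀ (p : List Int) (s : Int),
    (row.foldl (fun (ps : List Int × Int) v => (ps.1 ++ [ps.2 + v], ps.2 + v)) (p, s)).1
    = p ++ (List.range row.length).map (fun i => s + (row.take (i+1)).sum) := by
  induction row with
  | nil => intro p s; simp
  | cons v rest ih =>
    intro p s
    simp only [List.foldl_cons]
    rw [ih (p ++ [s + v]) (s + v)]
    rw [List.length_cons, List.range_succ_eq_map]
    simp [List.map_map, Function.comp_def, add_assoc]

theorem pv_pref_getD (row : List Int) (k : Nat) (hk : k ≤ row.length) :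
    ((row.foldl (fun (ps : List Int × Int) v => (ps.1 ++ [ps.2 + v], ps.2 + v)) ([0], 0)).1).getD k 0
    = (row.take k).sum := by
  rw [pv_pref_fold row [0] 0]
  cases k with
  | zero => simp
  | succ i =>
    have hi : i < row.length := by omega
    simp [List.getD, List.getElem?_append_right, List.getElem?_map, List.getElem?_range, hi]

-- faces fold as a window of take-sums
theorem pv_sumF_neg (m : Int) (hm : m ≤ 0) (prev : List Int) (tar : Int) :
    pvSumF m prev tar = 0 := by
  unfold pvSumF
  rw [PySem.List.pyRange_one_eq_nil (by omega)]
  rfl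

theorem pv_sumF_window (k : Nat) (prev : List Int) (tar : Int) (ht : 1 ≤ tar) :
    pvSumF (k : Int) prev tar
    = (prev.take tar.toNat).sum - (prev.take (tar.toNat - k)).sum := by
  induction k with
  | zero => simp [pv_sumF_neg 0 le_rfl]
  | succ k ih =>
    unfold pvSumF at ih ⊢
    have hc : ((k:Int)+1) + 1 = ((k+1:Nat):Int) + 1 := by push_cast; ring
    rw [← hc, PySem.List.pyRange_one_succ_right (by omega : (1:Int) ≤ (k:Int)+1)]
    rw [List.foldl_append]
    push_cast at ih ⊢
    rw [ih]
    simp only [List.foldl_cons, List.foldl_nil]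
    by_cases h : tar - ((k:Int) + 1) ≥ 0
    · rw [if_pos h]
      have h1 : tar.toNat - k = (tar.toNat - (k+1)) + 1 := by omega
      rw [PySem.List.pyGet?_of_nonneg prev (by omega)]
      have h2 : (tar - ((k:Int)+1)).toNat = tar.toNat - (k+1) := by omega
      rw [h2, h1, pv_take_sum_succ]
      have : prev.getD (tar.toNat - (k+1)) 0 = (prev[tar.toNat - (k+1)]?).getD 0 := by
        simp [List.getD]
      rw [this]
      ring
    · rw [if_neg h]
      have : tar.toNat - k = tar.toNat - (k+1) := by omega
      rw [this]

-- one A-row equals one B-row (same previous row)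
theorem pv_rowA_eq_rowB (m x : Int) (hx : 0 ≤ x) (prev : List Int)
    (hlen : prev.length = (x+1).toNat) :
    pvRowA m x prev (pvZ x) = pvRowB m x prev := by
  unfold pvRowA pvRowB pvZ
  refine PySem.List.foldl_congr_mem _ _ _ _ ?_
  intro row tar htar
  rw [PySem.List.mem_pyRange_one] at htar
  unfold pvSetRow
  congr 1
  -- value: window of take-sums on both sides
  have hm : pvSumF m prev tar = pvSumF ((m.toNat : Int)) prev tar := by
    by_cases h : m ≤ 0
    · rw [pv_sumF_neg m h, pv_sumF_neg (m.toNat) (by omega)]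
    · push_neg at h
      congr 1
      omega
  rw [hm, pv_sumF_window m.toNat prev tar (by omega)]
  have hlo : (max 0 (tar - max m 0)).toNat = tar.toNat - m.toNat := by omega
  rw [hlo]
  rw [pv_pref_getD prev tar.toNat (by omega), pv_pref_getD prev (tar.toNat - m.toNat) (by omega)]

theorem pv_foldl_set_length (ts : List Int) (f : Int → Int) :
    ∀ (r : List Int), (ts.foldl (fun row tar => pvSetRow row tar (f tar)) r).length = r.length := by
  induction ts with
  | nil => intro r; rfl
  | cons t ts ih => intro r; rw [List.foldl_cons, ih]; simp [pvSetRow]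

theorem pv_rowA_length (m x : Int) (prev start : List Int) :
    (pvRowA m x prev start).length = start.length := by
  unfold pvRowA; exact pv_foldl_set_length _ _ _

theorem pv_iter_length (m x : Int) (k : Nat) : (pvIter m x k).length = (x+1).toNat := by
  induction k with
  | zero => simp [pvIter, pvZ]
  | succ k ih => rw [pvIter, pv_rowA_length]; simp [pvZ]

-- B's loop is plain iteration of pvRowB
theorem pv_foldB (m x : Int) (ts : List Int) : ∀ (r : List Int),
    (ts.foldl (fun row (_ : Int) => pvRowB m x row) r) = (pvRowB m x)^[ts.length] r := by
  induction ts with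
  | nil => intro r; rfl
  | cons t ts ih =>
    intro r
    rw [List.foldl_cons, ih, List.length_cons, Function.iterate_succ_apply]

theorem pv_iterB (m x : Int) (hx : 0 ≤ x) (k : Nat) :
    (pvRowB m x)^[k] ((pvZ x).set 0 1) = pvIter m x k := by
  induction k with
  | zero => rfl
  | succ k ih =>
    rw [Function.iterate_succ_apply', ih, pvIter]
    rw [pv_rowA_eq_rowB m x hx _ (by rw [pv_iter_length])]

-- dp-level helpers for A's inner loop
theorem pv_getRow_nonneg (dp : List (List Int)) (i : Int) (h : 0 ≤ i) :
    pvGetRow dp i = (dp[i.toNat]?).getD [] := by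
  unfold pvGetRow
  rw [PySem.List.pyGet?_of_nonneg dp h]

theorem pv_getRow_set2_prev (dp : List (List Int)) (nn tar : Int) (v : Int) (h : 1 ≤ nn) :
    pvGetRow (pvSet2 dp nn tar v) (nn-1) = pvGetRow dp (nn-1) := by
  unfold pvSet2
  rw [pv_getRow_nonneg _ _ (by omega), List.getElem?_set_ne (by omega),
    ← pv_getRow_nonneg dp _ (by omega)]

theorem pv_getRow_set2_self (dp : List (List Int)) (nn tar : Int) (v : Int)
    (h0 : 0 ≤ nn) (h : nn.toNat < dp.length) :
    pvGetRow (pvSet2 dp nn tar v) nn = pvSetRow (pvGetRow dp nn) tar v := by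
  unfold pvSet2
  rw [pv_getRow_nonneg _ _ h0]
  simp [List.getElem?_set_self, h]

theorem pv_set2_set (dp : List (List Int)) (nn tar : Int) (v : Int) (r : List Int) :
    (pvSet2 dp nn tar v).set nn.toNat r = dp.set nn.toNat r := by
  unfold pvSet2
  rw [List.set_set]

theorem pv_set2_length (dp : List (List Int)) (nn tar : Int) (v : Int) :
    (pvSet2 dp nn tar v).length = dp.length := by
  unfold pvSet2; simp

-- locality: the inner tar-loop only rewrites row nn, reading the fixed row nn-1
theorem pv_inner_local (m nn : Int) (h1 : 1 ≤ nn) (ts : List Int) :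
    ∀ (dp : List (List Int)), nn.toNat < dp.length →
    ts.foldl (fun dp tar => pvSet2 dp nn tar (pvSumF m (pvGetRow dp (nn-1)) tar)) dp
    = dp.set nn.toNat
        (ts.foldl (fun row tar => pvSetRow row tar (pvSumF m (pvGetRow dp (nn-1)) tar)) (pvGetRow dp nn)) := by
  induction ts with
  | nil =>
    intro dp h2
    simp only [List.foldl_nil]
    rw [pv_getRow_nonneg dp nn (by omega), List.getElem?_eq_getElem h2]
    simp
  | cons t ts ih =>
    intro dp h2
    simp only [List.foldl_cons]
    rw [ih _ (by rw [pv_set2_length]; exact h2)]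
    rw [pv_set2_set]
    rw [pv_getRow_set2_prev dp nn t _ h1]
    rw [pv_getRow_set2_self dp nn t _ (by omega) h2]

-- the dp table after the first k outer iterations
def pvDP (m x : Int) (N k : Nat) : List (List Int) :=
  (List.range (N+1)).map (fun j => if j ≤ k then pvIter m x j else pvZ x)

theorem pv_DP_length (m x : Int) (N k : Nat) : (pvDP m x N k).length = N+1 := by
  simp [pvDP]

theorem pv_getRow_DP (m x : Int) (N k j : Nat) (hj : j ≤ N) :
    pvGetRow (pvDP m x N k) (j : Int) = if j ≤ k then pvIter m x j else pvZ x := by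
  rw [pv_getRow_nonneg _ _ (by omega)]
  simp only [Int.toNat_natCast, pvDP]
  rw [List.getElem?_map, List.getElem?_range (by omega)]
  rfl

theorem pv_set_DP (m x : Int) (N k : Nat) :
    (pvDP m x N k).set (k+1) (pvIter m x (k+1)) = pvDP m x N (k+1) := by
  apply List.ext_getElem?
  intro i
  by_cases hi : i < N+1
  · rw [List.getElem?_set]
    simp only [pv_DP_length]
    simp only [pvDP, List.getElem?_map, List.getElem?_range hi]
    by_cases h : k+1 = i
    · subst h; simp [hi]
    · rw [if_neg h]
      simp only [Option.map_some]
      by_cases hik : i ≤ k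
      · rw [if_pos hik, if_pos (by omega : i ≤ k+1)]
      · rw [if_neg hik, if_neg (by omega : ¬ i ≤ k+1)]
  · rw [List.getElem?_eq_none_iff.mpr, List.getElem?_eq_none_iff.mpr]
    · simp [pvDP]; omega
    · simp [pv_DP_length]; omega

def pvStepA (m x : Int) (dp : List (List Int)) (nn : Int) : List (List Int) :=
  (PySem.List.pyRange 1 (x+1) 1).foldl
    (fun dp tar => pvSet2 dp nn tar (pvSumF m (pvGetRow dp (nn-1)) tar)) dp

theorem pv_outer (m x : Int) (N : Nat) : ∀ (k : Nat), k ≤ N →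
    (PySem.List.pyRange 1 ((k:Int)+1) 1).foldl (pvStepA m x) (pvDP m x N 0) = pvDP m x N k := by
  intro k
  induction k with
  | zero =>
    intro _
    rw [PySem.List.pyRange_one_eq_nil (by omega)]
    rfl
  | succ k ih =>
    intro hk
    have hc : ((k+1:Nat):Int) + 1 = ((k:Int)+1) + 1 := by push_cast; ring
    rw [hc, PySem.List.pyRange_one_succ_right (by omega : (1:Int) ≤ (k:Int)+1)]
    rw [List.foldl_append, ih (by omega)]
    show pvStepA m x (pvDP m x N k) ((k:Int)+1) = pvDP m x N (k+1)
    unfold pvStepA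
    rw [pv_inner_local m ((k:Int)+1) (by omega) _ _
      (by rw [pv_DP_length]; omega)]
    have h1 : (k:Int)+1-1 = (k:Int) := by ring
    rw [h1, pv_getRow_DP m x N k k (by omega), if_pos le_rfl]
    have h2 : ((k:Int)+1) = ((k+1:Nat):Int) := by push_cast; ring
    rw [h2, pv_getRow_DP m x N k (k+1) (by omega), if_neg (by omega)]
    have h3 : ((k+1:Nat):Int).toNat = k+1 := by omega
    rw [h3]
    show (pvDP m x N k).set (k+1) (pvRowA m x (pvIter m x k) (pvZ x)) = pvDP m x N (k+1)
    rw [← pvIter]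
    exact pv_set_DP m x N k

theorem pv_init (m n x : Int) (hn : 0 ≤ n) :
    pvSet2 ((PySem.List.pyRange 0 (n+1) 1).map (fun _ => List.replicate (x+1).toNat 0)) 0 0 1
    = pvDP m x n.toNat 0 := by
  have hrep : (PySem.List.pyRange 0 (n+1) 1).map (fun _ => List.replicate (x+1).toNat 0)
      = List.replicate (n.toNat+1) (pvZ x) := by
    rw [List.map_const', PySem.List.length_pyRange_one]
    unfold pvZ
    congr 1
    omega
  rw [hrep]
  unfold pvSet2
  rw [pv_getRow_nonneg _ 0 le_rfl]
  simp only [Int.toNat_zero, List.getElem?_replicate, if_pos (by omega : 0 < n.toNat+1)]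
  apply List.ext_getElem?
  intro i
  by_cases hi : i < n.toNat+1
  · rw [List.getElem?_set]
    simp only [List.length_replicate, List.getElem?_replicate, pvDP,
      List.getElem?_map, List.getElem?_range hi]
    by_cases h : 0 = i
    · subst h
      simp [hi]
      rfl
    · rw [if_neg h, Option.map_some, if_neg (by omega : ¬ i ≤ 0), if_pos hi]
  · rw [List.getElem?_eq_none_iff.mpr (by simp; omega),
      List.getElem?_eq_none_iff.mpr (by simp [pv_DP_length]; omega)]

theorem pv_A_bridge (n m x : Int) :
    diceThrowTab n m x
    = (PySem.List.pyGet? (pvGetRow ((PySem.List.pyRange 1 (n+1) 1).foldl (pvStepA m x)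
        (pvSet2 ((PySem.List.pyRange 0 (n+1) 1).map (fun _ => List.replicate (x+1).toNat 0)) 0 0 1)) n)
        (-1)).getD 0 := rfl

theorem pv_B_bridge (n m x : Int) :
    diceThrowTab_alt n m x
    = (PySem.List.pyGet? ((PySem.List.pyRange 0 n 1).foldl (fun row (_ : Int) => pvRowB m x row)
        ((List.replicate (x+1).toNat 0).set 0 1)) x).getD 0 := rfl

theorem pv_main (n m x : Int) (hn : 0 ≤ n) (hx : 0 ≤ x) :
    diceThrowTab n m x = diceThrowTab_alt n m x := by
  rw [pv_A_bridge, pv_B_bridge]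
  rw [pv_init m n x hn]
  rw [show (List.replicate (x+1).toNat 0) = pvZ x from rfl]
  rw [show n = (n.toNat : Int) from by omega]
  simp only [Int.toNat_natCast]
  rw [pv_outer m x n.toNat n.toNat le_rfl]
  rw [pv_getRow_DP m x n.toNat n.toNat n.toNat le_rfl, if_pos le_rfl]
  rw [pv_foldB]
  rw [PySem.List.length_pyRange_one]
  simp only [Int.sub_zero, Int.toNat_natCast]
  rw [pv_iterB m x hx]
  rw [PySem.List.pyGet?_neg_one, PySem.List.pyGet?_of_nonneg _ hx]
  rw [List.getLast?_eq_getElem?, pv_iter_length]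
  congr 2
  omega

-- ===== VERDICT (by name: the statement is the Claim_ definition above) =====
theorem diceThrowTab_spec : Claim_equal_diceThrowTab := by
  intro n m x _ hpre
  unfold Pre_diceThrowTab at hpre
  unfold Spec_diceThrowTab
  exact pv_main n m x hpre.1 hpre.2
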